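-- pv_equiv track=rewrite | github.com/theonlynick0430/bc_algos | bc_algos/rollout/rollout_env.py | associate_sequences_evenly
-- ===== SOURCE A (Python) =====
-- def associate_sequences_evenly(x, y):
--     n = len(x)
--     m = len(y)
--     segment_length = n // m  # Base length of each segment
--     remainder = n % m        # Remainder that needs to be distributed
--
--     result_dict = {}
--     start_index = 0
--
--     for i in range(m):
--         # Add an extra element to this segment if there are still remainder elements to distribute
--         if remainder > 0:
--             end_index = start_index + segment_length + 1
--             remainder -= 1
--         else:
--             end_index = start_index + segment_length
--
--         segment = x[start_index:end_index]
--         start_index = end_index  # Update start index for the next segment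
--
--         # Map each element in the segment to the corresponding y value
--         for element in segment:
--             #result_dict[element] = end_index-1
--             result_dict[element] = y[i]
--
--     return result_dict
-- ===== SOURCE B (Python) =====
-- def associate_sequences_evenly(x, y):
--     n = len(x)
--     m = len(y)
--     q, r = divmod(n, m)
--     split = r * (q + 1)
--     result_dict = {}
--     for j, element in enumerate(x):
--         seg = j // (q + 1) if j < split else r + (j - split) // q
--         result_dict[element] = y[seg]
--     return result_dict
-- ===== Notes on version B (the rewrite author's own statement) =====
-- stated objective: alternative
-- what changed: Replaces A's stateful segment loop (running start index, remainder countdown, a slice per segment, nested element loop) with a single flat pass over enumerate(x) that computes each position's segment index by closed-form division.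
import Mathlib
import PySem

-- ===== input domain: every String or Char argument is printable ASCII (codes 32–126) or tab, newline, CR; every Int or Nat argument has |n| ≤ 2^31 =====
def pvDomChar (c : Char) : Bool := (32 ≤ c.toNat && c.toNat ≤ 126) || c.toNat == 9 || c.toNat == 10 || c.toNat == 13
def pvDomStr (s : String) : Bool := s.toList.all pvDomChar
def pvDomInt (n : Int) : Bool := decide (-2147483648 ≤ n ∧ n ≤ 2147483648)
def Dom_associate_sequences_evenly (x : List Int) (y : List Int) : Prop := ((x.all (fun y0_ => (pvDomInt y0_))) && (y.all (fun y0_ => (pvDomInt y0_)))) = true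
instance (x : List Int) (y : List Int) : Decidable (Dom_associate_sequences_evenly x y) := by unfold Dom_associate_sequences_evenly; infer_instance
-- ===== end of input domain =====

-- B replaces A's stateful segment loop (running start index, remainder countdown, slices) by a single
-- pass over enumerate(x) computing each position's segment index in closed form; equal cost, different decomposition.

-- ===== PORT A =====
-- loop body of A's 'for i in range(m)': state is (result_dict, start_index, remainder)
def pvStepA (x : List Int) (y : List Int) (segment_length : Int)
    (s : PySem.Dict Int Int × Int × Int) (i : Int) : PySem.Dict Int Int × Int × Int :=
  let end_index : Int := if s.2.2 > 0 then s.2.1 + segment_length + 1 else s.2.1 + segment_length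
  let remainder' : Int := if s.2.2 > 0 then s.2.2 - 1 else s.2.2
  let segment := PySem.List.slice x (some s.2.1) (some end_index)
  -- y[i]: 0 ≤ i < len(y) on every iteration, so the default of pyGetD never fires
  let d' := segment.foldl (fun d element => d.insert element (PySem.List.pyGetD y i 0)) s.1
  (d', end_index, remainder')

def associate_sequences_evenly (x : List Int) (y : List Int) : List (Int × Int) :=
  let n : Int := x.length
  let m : Int := y.length
  let segment_length : Int := PySem.Int.floordiv n m
  let remainder : Int := PySem.Int.mod n m
  ((PySem.List.pyRange 0 m 1).foldl (pvStepA x y segment_length)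
      (PySem.Dict.empty, 0, remainder)).1.items

-- ===== PORT B =====
-- loop body of B's 'for j, element in enumerate(x)'
def pvStepB (y : List Int) (q : Int) (r : Int) (split : Int)
    (d : PySem.Dict Int Int) (je : Int × Int) : PySem.Dict Int Int :=
  let seg : Int := if je.1 < split then PySem.Int.floordiv je.1 (q + 1)
                   else r + PySem.Int.floordiv (je.1 - split) q
  -- y[seg]: 0 ≤ seg < len(y) always, so the default of pyGetD never fires
  d.insert je.2 (PySem.List.pyGetD y seg 0)

def associate_sequences_evenly_alt (x : List Int) (y : List Int) : List (Int × Int) :=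
  let n : Int := x.length
  let m : Int := y.length
  let q : Int := PySem.Int.floordiv n m
  let r : Int := PySem.Int.mod n m
  let split : Int := r * (q + 1)
  ((PySem.List.enumerate x 0).foldl (pvStepB y q r split) PySem.Dict.empty).items

-- ===== PRECONDITION & SPEC =====
-- Pre_ excludes only y = [], on which Python A raises ZeroDivisionError (n // 0).
def Pre_associate_sequences_evenly (x : List Int) (y : List Int) : Prop := y ≠ []
instance (x : List Int) (y : List Int) : Decidable (Pre_associate_sequences_evenly x y) := by
  unfold Pre_associate_sequences_evenly; infer_instance

def pvWitness_associate_sequences_evenly : List Int × List Int := ([1, 2, 3], [10, 20])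

def Spec_associate_sequences_evenly (x : List Int) (y : List Int) (out : List (Int × Int)) : Prop :=
  out = associate_sequences_evenly_alt x y
instance (x : List Int) (y : List Int) (out : List (Int × Int)) :
    Decidable (Spec_associate_sequences_evenly x y out) := by
  unfold Spec_associate_sequences_evenly; infer_instance

-- ===== CLAIM (what is proved, stated in full; the proofs are below) =====
def Claim_equal_associate_sequences_evenly : Prop :=
  ∀ (x : List Int) (y : List Int), Dom_associate_sequences_evenly x y →
    Pre_associate_sequences_evenly x y →
    Spec_associate_sequences_evenly x y (associate_sequences_evenly x y)

-- ===== LEMMAS AND PROOFS =====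

-- segment index of position j (Nat form), for q = n // m, r = n % m
def pvSeg (q r j : Nat) : Nat :=
  if j < r * (q + 1) then j / (q + 1) else r + (j - r * (q + 1)) / q

-- start index of segment i
def pvS (q r i : Nat) : Nat := i * q + min i r

-- the common normal form of one insertion
def pvIns (x y : List Int) (q r : Nat) (d : PySem.Dict Int Int) (j : Nat) : PySem.Dict Int Int :=
  d.insert (x.getD j 0) (y.getD (pvSeg q r j) 0)

theorem pvS_succ (q r i : Nat) :
    pvS q r (i + 1) = pvS q r i + (if i < r then q + 1 else q) := by
  unfold pvS
  rcases Nat.lt_or_ge i r with h1 | h1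
  · rw [if_pos h1]
    have e1 : min i r = i := by omega
    have e2 : min (i + 1) r = i + 1 := by omega
    rw [e1, e2]; ring
  · rw [if_neg (by omega)]
    have e1 : min i r = r := by omega
    have e2 : min (i + 1) r = r := by omega
    rw [e1, e2]; ring

theorem pvS_top (q r M N : Nat) (hr : r < M) (hN : M * q + r = N) : pvS q r M = N := by
  unfold pvS
  have h : min M r = r := by omega
  rw [h]; exact hN

theorem pvS_le (q r M N i : Nat) (hi : i ≤ M) (hr : r < M) (hN : M * q + r = N) :
    pvS q r i ≤ N := by
  unfold pvS
  have h1 : i * q ≤ M * q := Nat.mul_le_mul_right q hi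
  have h2 : min i r ≤ r := Nat.min_le_right i r
  calc i * q + min i r ≤ M * q + r := Nat.add_le_add h1 h2
    _ = N := hN

theorem pvSeg_eq (q r i j : Nat) (hlo : pvS q r i ≤ j) (hhi : j < pvS q r (i + 1)) :
    pvSeg q r j = i := by
  unfold pvS at hlo hhi
  unfold pvSeg
  rcases Nat.lt_or_ge i r with h1 | h1
  · -- segments of length q+1
    have hmin : min i r = i := by omega
    have hmin' : min (i + 1) r = i + 1 := by omega
    have hsm : (i + 1) * q = i * q + q := Nat.succ_mul i q
    have hjlt : j < (i + 1) * (q + 1) := by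
      have h : (i + 1) * (q + 1) = i * q + q + i + 1 := by ring
      omega
    have hjge : i * (q + 1) ≤ j := by
      have h : i * (q + 1) = i * q + i := by ring
      omega
    have hcase : j < r * (q + 1) := by
      have h : (i + 1) * (q + 1) ≤ r * (q + 1) := Nat.mul_le_mul_right (q + 1) (by omega)
      omega
    rw [if_pos hcase]
    exact Nat.div_eq_of_lt_le hjge hjlt
  · -- segments of length q
    have hmin : min i r = r := by omega
    have hmin' : min (i + 1) r = r := by omega
    have hsm : (i + 1) * q = i * q + q := Nat.succ_mul i q
    have hrq : r * q ≤ i * q := Nat.mul_le_mul_right q h1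
    have hrq1 : r * (q + 1) = r * q + r := by ring
    have hcase : ¬ j < r * (q + 1) := by omega
    rw [if_neg hcase]
    have hsub : (i - r) * q = i * q - r * q := Nat.sub_mul i r q
    have hsub1 : (i - r + 1) * q = (i - r) * q + q := Nat.succ_mul (i - r) q
    have e1 : (i - r) * q ≤ j - r * (q + 1) := by omega
    have e2 : j - r * (q + 1) < (i - r + 1) * q := by omega
    rw [Nat.div_eq_of_lt_le e1 e2]
    omega

-- folding over a drop/take slice = folding over its index range
theorem pvFoldSeg {α β : Type} (f : β → α → β) (dflt : α) :
    ∀ (l s : Nat) (x : List α) (d : β), s + l ≤ x.length →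
      ((x.drop s).take l).foldl f d
        = (List.range' s l).foldl (fun d j => f d (x.getD j dflt)) d := by
  intro l
  induction l with
  | zero => intro s x d _; simp
  | succ l ih =>
    intro s x d h
    have hs : s < x.length := by omega
    rw [List.drop_eq_getElem_cons hs]
    have hr : List.range' s (l + 1) = s :: List.range' (s + 1) l := List.range'_succ ..
    rw [hr]
    simp only [List.take_succ_cons, List.foldl_cons]
    rw [List.getD_eq_getElem x dflt hs]
    exact ih (s + 1) x (f d x[s]) (by omega)

-- A's loop, from iteration i on, in normal form
theorem pvLoopA (x y : List Int) (hM : y.length ≠ 0) :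
    ∀ (k i : Nat), i + k = y.length → ∀ (d : PySem.Dict Int Int),
      ((PySem.List.pyRange (i : Int) (y.length : Int) 1).foldl
          (pvStepA x y ((x.length / y.length : Nat) : Int))
          (d, ((pvS (x.length / y.length) (x.length % y.length) i : Nat) : Int),
              ((x.length % y.length - i : Nat) : Int))).1
        = (List.range' (pvS (x.length / y.length) (x.length % y.length) i)
            (x.length - pvS (x.length / y.length) (x.length % y.length) i)).foldl
            (pvIns x y (x.length / y.length) (x.length % y.length)) d := by
  set N := x.length with hN
  set M := y.length with hMdef
  set q := N / M with hq
  set r := N % M with hr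
  have hrM : r < M := Nat.mod_lt _ (by omega)
  have hNqr : M * q + r = N := Nat.div_add_mod N M
  intro k
  induction k with
  | zero =>
    intro i hi d
    have hiM : i = M := by omega
    subst hiM
    rw [PySem.List.pyRange_one_eq_nil (le_refl _)]
    rw [pvS_top q r M N hrM hNqr]
    simp
  | succ k ih =>
    intro i hi d
    have hiM : i < M := by omega
    have hSstep : pvS q r (i + 1) = pvS q r i + (if i < r then q + 1 else q) := pvS_succ q r i
    have hSle : pvS q r (i + 1) ≤ N := pvS_le q r M N (i + 1) hiM hrM hNqr
    have hSmono : pvS q r i ≤ pvS q r (i + 1) := by rw [hSstep]; exact Nat.le_add_right _ _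
    rw [PySem.List.pyRange_one_cons (by exact_mod_cast hiM), List.foldl_cons]
    have harg : pvStepA x y ((q : Nat) : Int)
        (d, ((pvS q r i : Nat) : Int), ((r - i : Nat) : Int)) ((i : Nat) : Int)
        = (((x.drop (pvS q r i)).take (pvS q r (i + 1) - pvS q r i)).foldl
             (fun d e => d.insert e (PySem.List.pyGetD y ((i : Nat) : Int) 0)) d,
           ((pvS q r (i + 1) : Nat) : Int), ((r - (i + 1) : Nat) : Int)) := by
      simp only [pvStepA]
      by_cases hir : i < r
      · have hc : ((r - i : Nat) : Int) > 0 := by omega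
        rw [if_pos hc, if_pos hc]
        have he : ((pvS q r i : Nat) : Int) + (q : Int) + 1 = ((pvS q r (i + 1) : Nat) : Int) := by
          rw [hSstep, if_pos hir]; push_cast; ring
        have hrem : ((r - i : Nat) : Int) - 1 = ((r - (i + 1) : Nat) : Int) := by omega
        rw [he, hrem, PySem.List.slice_natCast]
      · have hc : ¬ ((r - i : Nat) : Int) > 0 := by omega
        rw [if_neg hc, if_neg hc]
        have he : ((pvS q r i : Nat) : Int) + (q : Int) = ((pvS q r (i + 1) : Nat) : Int) := by
          rw [hSstep, if_neg hir]; push_cast; ring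
        have hrem : ((r - i : Nat) : Int) = ((r - (i + 1) : Nat) : Int) := by omega
        rw [he, hrem, PySem.List.slice_natCast]
    rw [harg]
    have hcast : ((i : Nat) : Int) + 1 = (((i + 1 : Nat)) : Int) := by push_cast; ring
    rw [hcast, ih (i + 1) (by omega)]
    rw [pvFoldSeg _ 0 _ _ x d (by omega)]
    have hcong : (List.range' (pvS q r i) (pvS q r (i + 1) - pvS q r i)).foldl
        (fun d j => d.insert (x.getD j 0) (PySem.List.pyGetD y ((i : Nat) : Int) 0)) d
        = (List.range' (pvS q r i) (pvS q r (i + 1) - pvS q r i)).foldl (pvIns x y q r) d := by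
      apply PySem.List.foldl_congr_mem
      intro acc j hj
      rw [List.mem_range'_1] at hj
      have hseg : pvSeg q r j = i := pvSeg_eq q r i j hj.1 (by omega)
      simp [pvIns, hseg, PySem.List.pyGetD_natCast]
    rw [hcong]
    have hsplitr : List.range' (pvS q r i) (N - pvS q r i)
        = List.range' (pvS q r i) (pvS q r (i + 1) - pvS q r i)
          ++ List.range' (pvS q r (i + 1)) (N - pvS q r (i + 1)) := by
      have hsplit : N - pvS q r i = (pvS q r (i + 1) - pvS q r i) + (N - pvS q r (i + 1)) := by
        omega
      rw [hsplit, ← List.range'_append_1, Nat.add_sub_cancel' hSmono]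
    rw [hsplitr, List.foldl_append]

-- B's loop in the same normal form
theorem pvLoopB (x y : List Int) (hM : y.length ≠ 0) :
    ((PySem.List.enumerate x 0).foldl
        (pvStepB y ((x.length / y.length : Nat) : Int) ((x.length % y.length : Nat) : Int)
          (((x.length % y.length : Nat) : Int) * (((x.length / y.length : Nat) : Int) + 1)))
        PySem.Dict.empty)
      = (List.range' 0 x.length).foldl
          (pvIns x y (x.length / y.length) (x.length % y.length)) PySem.Dict.empty := by
  set N := x.length with hN
  set M := y.length with hMdef
  set q := N / M with hq
  set r := N % M with hr
  have hrM : r < M := Nat.mod_lt _ (by omega)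
  have hNqr : M * q + r = N := Nat.div_add_mod N M
  rw [PySem.List.enumerate_eq_map_pyRange x 0, List.foldl_map]
  have hlen : PySem.List.len x = ((N : Nat) : Int) := by simp [PySem.List.len, hN]
  rw [hlen, PySem.List.pyRange_zero_natCast, List.foldl_map, List.range_eq_range']
  apply PySem.List.foldl_congr_mem
  intro acc j hj
  simp only [pvStepB, pvIns, PySem.List.pyGetD_natCast]
  have hseg : (if ((j : Nat) : Int) < ((r : Nat) : Int) * (((q : Nat) : Int) + 1)
      then PySem.Int.floordiv ((j : Nat) : Int) (((q : Nat) : Int) + 1)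
      else ((r : Nat) : Int) + PySem.Int.floordiv (((j : Nat) : Int) - ((r : Nat) : Int) * (((q : Nat) : Int) + 1)) ((q : Nat) : Int))
      = ((pvSeg q r j : Nat) : Int) := by
    unfold pvSeg
    by_cases hc : j < r * (q + 1)
    · rw [if_pos (by exact_mod_cast hc), if_pos hc]
      have h1 : (((q : Nat) : Int) + 1) = (((q + 1 : Nat)) : Int) := by push_cast; ring
      rw [h1, PySem.Int.floordiv_natCast]
    · rw [if_neg (by exact_mod_cast hc), if_neg hc]
      have hsub : ((j : Nat) : Int) - ((r : Nat) : Int) * (((q : Nat) : Int) + 1)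
          = (((j - r * (q + 1) : Nat)) : Int) := by
        have h : r * (q + 1) ≤ j := Nat.le_of_not_lt hc
        push_cast [h]; ring
      rw [hsub, PySem.Int.floordiv_natCast]
      push_cast; ring
  rw [hseg]
  simp [PySem.List.pyGetD_natCast]

-- ===== VERDICT (by name: the statement is the Claim_ definition above) =====
theorem associate_sequences_evenly_spec : Claim_equal_associate_sequences_evenly := by
  intro x y _ hpre
  unfold Spec_associate_sequences_evenly
  unfold associate_sequences_evenly associate_sequences_evenly_alt
  simp only []
  have hM : y.length ≠ 0 := by simpa [List.length_eq_zero_iff] using hpre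
  have hqr : PySem.Int.floordiv (x.length : Int) (y.length : Int)
      = ((x.length / y.length : Nat) : Int) := PySem.Int.floordiv_natCast ..
  have hmd : PySem.Int.mod (x.length : Int) (y.length : Int)
      = ((x.length % y.length : Nat) : Int) := PySem.Int.mod_natCast ..
  rw [hqr, hmd]
  have hzero : (0 : Int) = ((pvS (x.length / y.length) (x.length % y.length) 0 : Nat) : Int) := by
    simp [pvS]
  have hrem : ((x.length % y.length : Nat) : Int)
      = ((x.length % y.length - 0 : Nat) : Int) := by omega
  calc ((PySem.List.pyRange 0 (y.length : Int) 1).foldl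
          (pvStepA x y ((x.length / y.length : Nat) : Int))
          (PySem.Dict.empty, 0, ((x.length % y.length : Nat) : Int))).1.items
      = ((PySem.List.pyRange ((0 : Nat) : Int) (y.length : Int) 1).foldl
          (pvStepA x y ((x.length / y.length : Nat) : Int))
          (PySem.Dict.empty, ((pvS (x.length / y.length) (x.length % y.length) 0 : Nat) : Int),
            ((x.length % y.length - 0 : Nat) : Int))).1.items := by
        rw [← hzero, ← hrem]; norm_num
    _ = ((List.range' (pvS (x.length / y.length) (x.length % y.length) 0)
          (x.length - pvS (x.length / y.length) (x.length % y.length) 0)).foldl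
          (pvIns x y (x.length / y.length) (x.length % y.length)) PySem.Dict.empty).items := by
        rw [pvLoopA x y hM y.length 0 (by omega) PySem.Dict.empty]
    _ = ((List.range' 0 x.length).foldl
          (pvIns x y (x.length / y.length) (x.length % y.length)) PySem.Dict.empty).items := by
        simp [pvS]
    _ = ((PySem.List.enumerate x 0).foldl
          (pvStepB y ((x.length / y.length : Nat) : Int) ((x.length % y.length : Nat) : Int)
            (((x.length % y.length : Nat) : Int) * (((x.length / y.length : Nat) : Int) + 1)))
          PySem.Dict.empty).items := by rw [pvLoopB x y hM]
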